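-- pv_equiv track=rewrite | github.com/mervyn-teo/cs4218-2520-ecom-project-cs4218-2520-team04 | multi-agentic-system/testing_agents/agents.py | _summarize_failure_feedback
-- ===== SOURCE A (Python) =====
-- def _summarize_failure_feedback(raw_feedback: str) -> str:
--     lines = [line.strip() for line in raw_feedback.splitlines() if line.strip()]
--     priority_markers = (
--         "SyntaxError",
--         "ReferenceError",
--         "TypeError",
--         "Cannot find module",
--         "Expected:",
--         "Received:",
--         "Matcher error",
--         "thrown:",
--         "FAIL ",
--     )
--
--     selected: list[str] = []
--     for marker in priority_markers:
--         for line in lines: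
--             if marker in line and line not in selected:
--                 selected.append(line)
--             if len(selected) >= 4:
--                 break
--         if len(selected) >= 4:
--             break
--
--     if not selected:
--         selected = lines[:4]
--
--     if not selected:
--         return "Verification failed, but no usable Jest output was captured. Recheck imports, mocks, async handling, and assertions."
--
--     summary = "; ".join(selected[:4])
--     return f"Revise the generated test to address this Jest failure: {summary}"
-- ===== SOURCE B (Python) =====
-- def _summarize_failure_feedback(raw_feedback: str) -> str:
--     lines = [s for s in (line.strip() for line in raw_feedback.splitlines()) if s]
--     markers = (
--         "SyntaxError",
--         "ReferenceError",
--         "TypeError",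
--         "Cannot find module",
--         "Expected:",
--         "Received:",
--         "Matcher error",
--         "thrown:",
--         "FAIL ",
--     )
--
--     # One pass over the lines: drop each line into the bucket of the FIRST
--     # marker it contains (lines matching no marker are dropped).
--     buckets = [[] for _ in markers]
--     for line in lines:
--         for i, marker in enumerate(markers):
--             if marker in line:
--                 buckets[i].append(line)
--                 break
--
--     # Walk the buckets in priority order, keeping first occurrences, up to 4.
--     selected = []
--     for line in (entry for bucket in buckets for entry in bucket):
--         if line not in selected:
--             selected.append(line)
--         if len(selected) == 4:
--             break
--
--     if not selected:
--         selected = lines[:4]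
--
--     if not selected:
--         return "Verification failed, but no usable Jest output was captured. Recheck imports, mocks, async handling, and assertions."
--
--     return "Revise the generated test to address this Jest failure: " + "; ".join(selected[:4])
-- ===== Notes on version B (the rewrite author's own statement) =====
-- stated objective: alternative
-- what changed: Replaces A's marker-major nested rescans (one full pass over the lines per marker, with dedup and early breaks inside the loops) by a single line-major pass that buckets each line under its first matching marker, followed by one flat dedup-take-4 walk over the concatenated buckets.
import Mathlib
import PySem

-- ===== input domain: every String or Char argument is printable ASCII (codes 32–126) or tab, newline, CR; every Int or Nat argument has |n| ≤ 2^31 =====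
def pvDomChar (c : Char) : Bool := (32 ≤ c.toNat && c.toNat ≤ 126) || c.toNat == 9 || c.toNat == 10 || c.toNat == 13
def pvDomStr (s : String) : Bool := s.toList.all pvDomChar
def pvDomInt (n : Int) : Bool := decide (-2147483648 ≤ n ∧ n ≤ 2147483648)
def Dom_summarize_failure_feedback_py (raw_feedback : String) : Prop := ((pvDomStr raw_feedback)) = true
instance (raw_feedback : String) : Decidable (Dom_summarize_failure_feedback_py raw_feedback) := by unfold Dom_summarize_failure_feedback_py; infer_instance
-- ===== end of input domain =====

-- B replaces A's marker-major nested rescans by one line-major pass that buckets each line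
-- under its first matching marker, then one flat dedup-take-4 walk (objective: alternative).

-- ===== PORT A =====
def pvMarkersA : List String :=
  ["SyntaxError", "ReferenceError", "TypeError", "Cannot find module", "Expected:",
   "Received:", "Matcher error", "thrown:", "FAIL "]

-- inner 'for line in lines' loop for one marker, with the 'if len(selected) >= 4: break'
def pvInnerA (marker : String) : List String → List String → List String
  | [], sel => sel
  | l :: rest, sel =>
    let sel' := if PySem.Str.isIn marker l && !(sel.contains l) then sel ++ [l] else sel
    if 4 ≤ sel'.length then sel' else pvInnerA marker rest sel'

-- outer 'for marker in priority_markers' loop with its own break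
def pvOuterA (lines : List String) : List String → List String → List String
  | [], sel => sel
  | m :: ms, sel =>
    let sel' := pvInnerA m lines sel
    if 4 ≤ sel'.length then sel' else pvOuterA lines ms sel'

def summarize_failure_feedback_py (raw_feedback : String) : String :=
  let lines := ((PySem.Str.splitlines raw_feedback).filter
      (fun line => !(PySem.Str.strip line == ""))).map PySem.Str.strip
  let selected := pvOuterA lines pvMarkersA []
  let selected := if selected.isEmpty then lines.take 4 else selected
  if selected.isEmpty then
    "Verification failed, but no usable Jest output was captured. Recheck imports, mocks, async handling, and assertions."
  else
    "Revise the generated test to address this Jest failure: " ++ PySem.Str.join "; " (selected.take 4)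

-- ===== PORT B =====
def pvMarkersB : List String :=
  ["SyntaxError", "ReferenceError", "TypeError", "Cannot find module", "Expected:",
   "Received:", "Matcher error", "thrown:", "FAIL "]

-- 'for i, marker in enumerate(markers): if marker in line: … break'
def pvFirstIdxB : List String → Nat → String → Option Nat
  | [], _, _ => none
  | m :: ms, i, line => if PySem.Str.isIn m line then some i else pvFirstIdxB ms (i + 1) line

-- one step of the single pass over the lines: drop the line into its bucket
def pvBucketB (buckets : List (List String)) (line : String) : List (List String) :=
  match pvFirstIdxB pvMarkersB 0 line with
  | some i => buckets.modify i (· ++ [line])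
  | none => buckets

-- 'for line in (entry for bucket in buckets for entry in bucket): …' dedup walk, stop at 4
def pvSelectB : List String → List String → List String
  | [], sel => sel
  | line :: rest, sel =>
    let sel' := if sel.contains line then sel else sel ++ [line]
    if sel'.length = 4 then sel' else pvSelectB rest sel'

def summarize_failure_feedback_py_alt (raw_feedback : String) : String :=
  let lines := ((PySem.Str.splitlines raw_feedback).map PySem.Str.strip).filter
      (fun s => !(s == ""))
  let buckets := lines.foldl pvBucketB (List.replicate 9 [])
  let selected := pvSelectB buckets.flatten []
  let selected := if selected.isEmpty then lines.take 4 else selected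
  if selected.isEmpty then
    "Verification failed, but no usable Jest output was captured. Recheck imports, mocks, async handling, and assertions."
  else
    "Revise the generated test to address this Jest failure: " ++ PySem.Str.join "; " (selected.take 4)

-- ===== PRECONDITION & SPEC =====
def Spec_summarize_failure_feedback_py (raw_feedback : String) (out : String) : Prop := out = summarize_failure_feedback_py_alt raw_feedback
instance (raw_feedback : String) (out : String) : Decidable (Spec_summarize_failure_feedback_py raw_feedback out) := by unfold Spec_summarize_failure_feedback_py; infer_instance

-- ===== CLAIM (what is proved, stated in full; the proofs are below) =====
def Claim_equal_summarize_failure_feedback_py : Prop := ∀ (raw_feedback : String), Dom_summarize_failure_feedback_py raw_feedback → Spec_summarize_failure_feedback_py raw_feedback (summarize_failure_feedback_py raw_feedback)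

-- ===== LEMMAS AND PROOFS =====

-- the buckets concatenated, marker-relative: first all lines containing the head marker,
-- then the buckets of the remaining markers among the lines NOT containing it
def pvGroups : List String → List String → List String
  | [], _ => []
  | m :: ms, lines =>
    lines.filter (fun l => PySem.Str.isIn m l) ++
      pvGroups ms (lines.filter (fun l => !(PySem.Str.isIn m l)))

-- ---- pvSelectB basic facts ----

theorem pvSelectB_len (xs : List String) : ∀ sel : List String, sel.length < 4 → (pvSelectB xs sel).length ≤ 4 := by
  induction xs with
  | nil => intro sel h; simpa [pvSelectB] using Nat.le_of_lt h
  | cons x rest ih =>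
    intro sel h
    simp only [pvSelectB]
    by_cases hc : sel.contains x = true
    · rw [if_pos hc, if_neg (by omega : ¬ sel.length = 4)]
      exact ih sel h
    · rw [if_neg hc]
      have hlen : (sel ++ [x]).length = sel.length + 1 := by simp
      by_cases h4 : (sel ++ [x]).length = 4
      · rw [if_pos h4]; omega
      · rw [if_neg h4]; exact ih _ (by omega)

theorem pvSelectB_append (xs ys : List String) : ∀ sel : List String, sel.length < 4 →
    pvSelectB (xs ++ ys) sel =
      (if (pvSelectB xs sel).length = 4 then pvSelectB xs sel else pvSelectB ys (pvSelectB xs sel)) := by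
  induction xs with
  | nil =>
    intro sel h
    simp only [List.nil_append, pvSelectB]
    rw [if_neg (by omega : ¬ sel.length = 4)]
  | cons x rest ih =>
    intro sel h
    simp only [List.cons_append, pvSelectB]
    by_cases hc : sel.contains x = true
    · rw [if_pos hc, if_neg (by omega : ¬ sel.length = 4), if_neg (by omega : ¬ sel.length = 4)]
      exact ih sel h
    · rw [if_neg hc]
      have hlen : (sel ++ [x]).length = sel.length + 1 := by simp
      by_cases h4 : (sel ++ [x]).length = 4
      · rw [if_pos h4, if_pos h4, if_pos h4]
      · rw [if_neg h4, if_neg h4]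
        exact ih _ (by omega)

theorem pvSelectB_mem_mono (xs : List String) : ∀ sel x, x ∈ sel → x ∈ pvSelectB xs sel := by
  induction xs with
  | nil => intro sel x hx; simpa [pvSelectB] using hx
  | cons y rest ih =>
    intro sel x hx
    simp only [pvSelectB]
    by_cases hc : sel.contains y = true
    · rw [if_pos hc]
      by_cases h4 : sel.length = 4
      · rw [if_pos h4]; exact hx
      · rw [if_neg h4]; exact ih _ _ hx
    · rw [if_neg hc]
      by_cases h4 : (sel ++ [y]).length = 4
      · rw [if_pos h4]; exact List.mem_append_left _ hx
      · rw [if_neg h4]; exact ih _ _ (List.mem_append_left _ hx)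

theorem pvSelectB_mem_all (xs : List String) : ∀ sel : List String, sel.length < 4 →
    (pvSelectB xs sel).length < 4 → ∀ x ∈ xs, x ∈ pvSelectB xs sel := by
  induction xs with
  | nil => intro sel _ _ x hx; cases hx
  | cons y rest ih =>
    intro sel h hres x hx
    simp only [pvSelectB] at hres ⊢
    by_cases hc : sel.contains y = true
    · have hy : y ∈ sel := by simpa using hc
      rw [if_pos hc, if_neg (by omega : ¬ sel.length = 4)] at hres ⊢
      rcases List.mem_cons.mp hx with hx1 | hx2
      · exact pvSelectB_mem_mono _ _ _ (hx1 ▸ hy)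
      · exact ih sel h hres x hx2
    · rw [if_neg hc] at hres ⊢
      have hlen : (sel ++ [y]).length = sel.length + 1 := by simp
      by_cases h4 : (sel ++ [y]).length = 4
      · rw [if_pos h4] at hres; omega
      · rw [if_neg h4] at hres ⊢
        rcases List.mem_cons.mp hx with hx1 | hx2
        · exact pvSelectB_mem_mono _ _ _ (by simp [hx1])
        · exact ih _ (by omega) hres x hx2

-- dropping list elements already selected does not change the walk
theorem pvSelectB_filter_out (xs : List String) (q : String → Bool) : ∀ sel : List String, sel.length < 4 →
    (∀ l ∈ xs, q l = true → l ∈ sel) →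
    pvSelectB (xs.filter (fun l => !(q l))) sel = pvSelectB xs sel := by
  induction xs with
  | nil => intro sel _ _; rfl
  | cons x rest ih =>
    intro sel h hq
    by_cases hx : q x = true
    · have hxs : x ∈ sel := hq x (by simp) hx
      have hc : sel.contains x = true := by simpa using hxs
      have hstep : List.filter (fun l => !(q l)) (x :: rest) = List.filter (fun l => !(q l)) rest := by
        simp [hx]
      rw [hstep, ih sel h (fun l hl => hq l (by simp [hl]))]
      conv_rhs => simp only [pvSelectB]
      rw [if_pos hc, if_neg (by omega : ¬ sel.length = 4)]
    · have hx' : (!(q x)) = true := by simp [hx]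
      simp only [List.filter_cons, hx', if_true, pvSelectB]
      by_cases hc : sel.contains x = true
      · rw [if_pos hc, if_neg (by omega : ¬ sel.length = 4), if_neg (by omega : ¬ sel.length = 4)]
        exact ih sel h (fun l hl hql => hq l (by simp [hl]) hql)
      · rw [if_neg hc]
        have hlen : (sel ++ [x]).length = sel.length + 1 := by simp
        by_cases h4 : (sel ++ [x]).length = 4
        · rw [if_pos h4, if_pos h4]
        · rw [if_neg h4, if_neg h4]
          exact ih _ (by omega) (fun l hl hql => List.mem_append_left _ (hq l (by simp [hl]) hql))

-- ---- A's inner pass is the dedup walk over the filtered lines ----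

theorem pvInnerA_eq (m : String) (lines : List String) : ∀ sel : List String, sel.length < 4 →
    pvInnerA m lines sel = pvSelectB (lines.filter (fun l => PySem.Str.isIn m l)) sel := by
  induction lines with
  | nil => intro sel _; rfl
  | cons l rest ih =>
    intro sel h
    simp only [pvInnerA, List.filter_cons]
    by_cases hm : PySem.Str.isIn m l = true
    · rw [if_pos hm]
      simp only [pvSelectB]
      by_cases hc : l ∈ sel
      · have hcon : sel.contains l = true := by simpa using hc
        rw [if_neg (by rw [hcon]; simp : ¬ (PySem.Str.isIn m l && !(sel.contains l)) = true),
            if_neg (by omega : ¬ 4 ≤ sel.length),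
            if_pos hcon, if_neg (by omega : ¬ sel.length = 4)]
        exact ih sel h
      · have hcon : sel.contains l = false := by simpa using hc
        rw [if_pos (by rw [hm, hcon]; rfl : (PySem.Str.isIn m l && !(sel.contains l)) = true),
            if_neg (by rw [hcon]; simp : ¬ sel.contains l = true)]
        have hlen : (sel ++ [l]).length = sel.length + 1 := by simp
        by_cases h4 : (sel ++ [l]).length = 4
        · rw [if_pos (by omega : 4 ≤ (sel ++ [l]).length), if_pos h4]
        · rw [if_neg (by omega : ¬ 4 ≤ (sel ++ [l]).length), if_neg h4]
          exact ih _ (by omega)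
    · have hmf : PySem.Str.isIn m l = false := by
        cases hv : PySem.Str.isIn m l
        · rfl
        · exact absurd hv hm
      rw [if_neg hm,
          if_neg (by rw [hmf]; simp : ¬ (PySem.Str.isIn m l && !(sel.contains l)) = true),
          if_neg (by omega : ¬ 4 ≤ sel.length)]
      exact ih sel h

-- pvGroups commutes with filtering the lines
theorem pvGroups_filter (ms : List String) : ∀ (lines : List String) (q : String → Bool),
    pvGroups ms (lines.filter q) = (pvGroups ms lines).filter q := by
  induction ms with
  | nil => intro lines q; rfl
  | cons m ms ih =>
    intro lines q
    simp only [pvGroups, List.filter_append]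
    congr 1
    · rw [List.filter_filter, List.filter_filter]
      congr 1
      funext l
      exact Bool.and_comm _ _
    · rw [ih (lines.filter q) (fun l => !(PySem.Str.isIn m l)), ih lines q,
          ih lines (fun l => !(PySem.Str.isIn m l)),
          List.filter_filter, List.filter_filter]
      congr 1
      funext l
      exact Bool.and_comm _ _

theorem pvGroups_sub (ms : List String) : ∀ lines l, l ∈ pvGroups ms lines → l ∈ lines := by
  induction ms with
  | nil => intro lines l h; cases h
  | cons m ms ih =>
    intro lines l h
    simp only [pvGroups, List.mem_append] at h
    rcases h with h | h
    · exact List.mem_of_mem_filter h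
    · exact List.mem_of_mem_filter (ih _ _ h)

-- ---- A's outer loop is the dedup walk over the concatenated buckets ----

theorem pvOuterA_eq (ms : List String) : ∀ (lines sel : List String), sel.length < 4 →
    pvOuterA lines ms sel = pvSelectB (pvGroups ms lines) sel := by
  induction ms with
  | nil => intro lines sel _; rfl
  | cons m ms ih =>
    intro lines sel h
    simp only [pvOuterA, pvGroups]
    rw [pvInnerA_eq m lines sel h, pvSelectB_append _ _ sel h]
    set r := pvSelectB (lines.filter (fun l => PySem.Str.isIn m l)) sel with hr
    have hle : r.length ≤ 4 := pvSelectB_len _ sel h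
    by_cases h4 : r.length = 4
    · have : 4 ≤ r.length := by omega
      simp [h4]
    · have hlt : r.length < 4 := by omega
      have : ¬ 4 ≤ r.length := by omega
      simp only [this, if_false, h4, if_false]
      rw [ih lines r hlt, pvGroups_filter]
      rw [pvSelectB_filter_out (pvGroups ms lines) (fun l => PySem.Str.isIn m l) r hlt]
      intro l hl hql
      have hl' : l ∈ lines := pvGroups_sub ms lines l hl
      have : l ∈ lines.filter (fun l => PySem.Str.isIn m l) := List.mem_filter.mpr ⟨hl', hql⟩
      exact pvSelectB_mem_all _ sel h hlt l this

-- ---- B's single pass builds exactly those buckets ----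

theorem pvFirstIdxB_bounds (ms : List String) : ∀ i l j, pvFirstIdxB ms i l = some j → i ≤ j ∧ j < i + ms.length := by
  induction ms with
  | nil => intro i l j h; cases h
  | cons m ms ih =>
    intro i l j h
    simp only [pvFirstIdxB] at h
    split at h
    · cases h; simp
    · have := ih (i + 1) l j h
      simp only [List.length_cons]
      omega

theorem pvFirstIdxB_head (m : String) (ms : List String) (i : Nat) (l : String) :
    (pvFirstIdxB (m :: ms) i l == some (i + 0)) = PySem.Str.isIn m l := by
  simp only [pvFirstIdxB]
  by_cases hm : PySem.Str.isIn m l = true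
  · rw [if_pos hm, hm]
    simp
  · have hmf : PySem.Str.isIn m l = false := by
      cases hv : PySem.Str.isIn m l
      · rfl
      · exact absurd hv hm
    rw [if_neg hm, hmf]
    cases hj : pvFirstIdxB ms (i + 1) l with
    | none => rfl
    | some j =>
      have hb := pvFirstIdxB_bounds ms (i + 1) l j hj
      simp only [beq_eq_false_iff_ne, ne_eq, Option.some.injEq]
      omega

theorem pvFirstIdxB_tail (m : String) (ms : List String) (i : Nat) (l : String) (j : Nat) :
    (pvFirstIdxB (m :: ms) i l == some (i + (j + 1))) =
      (!(PySem.Str.isIn m l) && (pvFirstIdxB ms (i + 1) l == some ((i + 1) + j))) := by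
  simp only [pvFirstIdxB]
  by_cases hm : PySem.Str.isIn m l = true
  · rw [if_pos hm, hm]
    simp only [Bool.not_true, Bool.false_and, beq_eq_false_iff_ne, ne_eq, Option.some.injEq]
    omega
  · have hmf : PySem.Str.isIn m l = false := by
      cases hv : PySem.Str.isIn m l
      · rfl
      · exact absurd hv hm
    rw [if_neg hm, hmf]
    have harith : i + (j + 1) = (i + 1) + j := by omega
    rw [harith]
    simp

-- value of the full bucket list
def pvBucketsOf (lines : List String) : List (List String) :=
  (List.range 9).map (fun j => lines.filter (fun l => pvFirstIdxB pvMarkersB 0 l == some j))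

theorem pvBucketsOf_length (lines : List String) : (pvBucketsOf lines).length = 9 := by
  simp [pvBucketsOf]

theorem pvFold_buckets (lines : List String) : ∀ bs : List (List String), bs.length = 9 →
    lines.foldl pvBucketB bs = List.zipWith (· ++ ·) bs (pvBucketsOf lines) := by
  induction lines with
  | nil =>
    intro bs hbs
    apply List.ext_getElem
    · simp [pvBucketsOf, hbs]
    · intro n h1 h2
      have hn9 : n < 9 := by
        simp only [List.length_zipWith, pvBucketsOf_length, hbs] at h2
        omega
      simp only [List.foldl_nil, List.getElem_zipWith]
      simp [pvBucketsOf]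
      interval_cases n <;> rfl
  | cons l rest ih =>
    intro bs hbs
    simp only [List.foldl_cons]
    have hstep : List.zipWith (· ++ ·) (pvBucketB bs l) (pvBucketsOf rest) =
        List.zipWith (· ++ ·) bs (pvBucketsOf (l :: rest)) := by
      unfold pvBucketB
      cases hfi : pvFirstIdxB pvMarkersB 0 l with
      | none =>
        apply List.ext_getElem
        · simp [pvBucketsOf, hbs]
        · intro n h1 h2
          simp only [pvBucketsOf, List.getElem_zipWith, List.getElem_map, List.getElem_range,
            List.filter_cons, hfi]
          simp
      | some i =>
        have hib := pvFirstIdxB_bounds pvMarkersB 0 l i hfi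
        have hi9 : i < 9 := by simpa [pvMarkersB] using hib.2
        apply List.ext_getElem
        · simp [pvBucketsOf, hbs]
        · intro n h1 h2
          have hn9 : n < 9 := by
            simp only [List.length_zipWith, List.length_modify, hbs, pvBucketsOf_length] at h1
            omega
          simp only [pvBucketsOf, List.getElem_zipWith, List.getElem_map, List.getElem_range,
            List.getElem_modify, List.filter_cons, hfi]
          by_cases hni : n = i
          · subst hni
            simp [List.append_assoc]
          · have hne : ((some i : Option Nat) == some n) = false := by
              simp only [beq_eq_false_iff_ne, ne_eq, Option.some.injEq]
              omega
            simp [hni, hne] <;> omega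
    rw [ih (pvBucketB bs l) (by unfold pvBucketB; cases pvFirstIdxB pvMarkersB 0 l <;> simp [hbs]), hstep]

theorem pvZip_replicate (F : List (List String)) : ∀ n, F.length = n →
    List.zipWith (· ++ ·) (List.replicate n ([] : List String)) F = F := by
  induction F with
  | nil => intro n h; simp
  | cons b F ih =>
    intro n h
    cases n with
    | zero => cases h
    | succ n =>
      simp only [List.replicate_succ, List.zipWith_cons_cons, List.nil_append]
      rw [ih n (by simpa using h)]

-- the buckets concatenated in index order ARE the marker-relative groups
theorem pvFlatten_groups (ms : List String) : ∀ (i : Nat) (lines : List String),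
    ((List.range ms.length).map (fun j => lines.filter (fun l => pvFirstIdxB ms i l == some (i + j)))).flatten
      = pvGroups ms lines := by
  induction ms with
  | nil => intro i lines; rfl
  | cons m ms ih =>
    intro i lines
    simp only [List.length_cons]
    rw [List.range_succ_eq_map]
    simp only [List.map_cons, List.map_map, List.flatten_cons, pvGroups]
    congr 1
    · apply List.filter_congr
      intro l _
      exact pvFirstIdxB_head m ms i l
    · have hmap : (List.range ms.length).map
          ((fun j => lines.filter (fun l => pvFirstIdxB (m :: ms) i l == some (i + j))) ∘ Nat.succ)
          = (List.range ms.length).map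
            (fun j => (lines.filter (fun l => !(PySem.Str.isIn m l))).filter
              (fun l => pvFirstIdxB ms (i + 1) l == some ((i + 1) + j))) := by
        apply List.map_congr_left
        intro j _
        simp only [Function.comp_apply]
        rw [List.filter_filter]
        apply List.filter_congr
        intro l _
        rw [pvFirstIdxB_tail m ms i l j]
        exact Bool.and_comm _ _
      rw [hmap]
      exact ih (i + 1) (lines.filter (fun l => !(PySem.Str.isIn m l)))

-- ===== VERDICT (by name: the statement is the Claim_ definition above) =====
theorem summarize_failure_feedback_py_spec : Claim_equal_summarize_failure_feedback_py := by
  intro raw _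
  unfold Spec_summarize_failure_feedback_py
  unfold summarize_failure_feedback_py summarize_failure_feedback_py_alt
  have hlines : ((PySem.Str.splitlines raw).map PySem.Str.strip).filter (fun s => !(s == ""))
      = ((PySem.Str.splitlines raw).filter (fun line => !(PySem.Str.strip line == ""))).map PySem.Str.strip := by
    rw [List.filter_map]
    rfl
  rw [hlines]
  set lines := ((PySem.Str.splitlines raw).filter
      (fun line => !(PySem.Str.strip line == ""))).map PySem.Str.strip with hl
  have hsel : pvSelectB ((lines.foldl pvBucketB (List.replicate 9 [])).flatten) []
      = pvOuterA lines pvMarkersA [] := by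
    rw [pvFold_buckets lines (List.replicate 9 []) (by simp),
        pvZip_replicate (pvBucketsOf lines) 9 (pvBucketsOf_length lines)]
    have hflat : (pvBucketsOf lines).flatten = pvGroups pvMarkersB lines := by
      have := pvFlatten_groups pvMarkersB 0 lines
      simpa [pvBucketsOf, pvMarkersB] using this
    rw [hflat]
    have hmk : pvMarkersB = pvMarkersA := rfl
    rw [hmk, ← pvOuterA_eq pvMarkersA lines [] (by simp)]
  simp only [hsel]
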